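-- pv_equiv track=rewrite | github.com/NobuyukiInoue/LeetCode | Problems/2400_2499/2432_The_Employee_That_Worked_on_the_Longest_Task/Project_Python3/The_Employee_That_Worked_on_the_Longest_Task.py | hardestWorker3
-- ===== SOURCE A (Python) =====
-- from typing import List, Dict, Tuple
--
-- def hardestWorker3(n: int, logs: List[List[int]]) -> int:
--     # 319ms - 840ms
--     id = logs[0][0]
--     last_end_time = max_work_time = logs[0][1]
--     for i in range(1, len(logs)):
--         work_time = logs[i][1] - last_end_time
--         if work_time == max_work_time:
--             id = min(logs[i][0], id)
--         elif work_time > max_work_time: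
--             max_work_time = work_time
--             id = logs[i][0]
--         last_end_time = logs[i][1]
--     return id
-- ===== SOURCE B (Python) =====
-- from typing import List
--
-- def hardestWorker3(n: int, logs: List[List[int]]) -> int:
--     # sort-then-pick: collect (prev_end - leave_time, id) = (-duration, id)
--     # pairs, sort them lexicographically, and take the first pair's id:
--     # the smallest tuple has the largest duration and, among ties, the
--     # smallest id.
--     pairs = []
--     prev = 0
--     for log in logs:
--         pairs.append((prev - log[1], log[0]))
--         prev = log[1]
--     pairs.sort()
--     return pairs[0][1]
-- ===== Notes on version B (the rewrite author's own statement) =====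
-- stated objective: alternative
-- what changed: Replaces A's fused single-pass scan that tracks (id, last_end_time, max_work_time) with a sort-then-pick: build (-duration, id) pairs, lexicographically sort them, and return the id of the first (smallest) pair.
import Mathlib
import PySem

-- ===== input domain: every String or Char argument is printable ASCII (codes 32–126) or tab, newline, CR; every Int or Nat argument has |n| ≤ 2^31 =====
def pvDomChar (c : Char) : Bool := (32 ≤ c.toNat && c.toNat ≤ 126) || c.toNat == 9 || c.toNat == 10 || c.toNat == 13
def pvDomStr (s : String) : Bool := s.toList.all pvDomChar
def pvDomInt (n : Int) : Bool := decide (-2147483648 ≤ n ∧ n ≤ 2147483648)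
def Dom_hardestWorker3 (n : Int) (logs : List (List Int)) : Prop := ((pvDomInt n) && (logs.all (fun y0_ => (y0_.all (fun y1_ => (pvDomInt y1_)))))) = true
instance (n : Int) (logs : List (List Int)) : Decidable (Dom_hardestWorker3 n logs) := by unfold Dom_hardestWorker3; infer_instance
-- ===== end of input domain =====

-- B replaces A's fused running-max scan with build (-duration, id) pairs, lexicographic sort, take first; return values agree on Pre_.

-- ===== PORT A =====
-- the loop body of A, over state (id, last_end_time, max_work_time)
def stepA (st : Int × Int × Int) (row : List Int) : Int × Int × Int :=
  let work_time := PySem.List.pyGetD row 1 0 - st.2.1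
  if work_time = st.2.2 then
    (min (PySem.List.pyGetD row 0 0) st.1, PySem.List.pyGetD row 1 0, st.2.2)
  else if work_time > st.2.2 then
    (PySem.List.pyGetD row 0 0, PySem.List.pyGetD row 1 0, work_time)
  else
    (st.1, PySem.List.pyGetD row 1 0, st.2.2)

def hardestWorker3 (n : Int) (logs : List (List Int)) : Int :=
  let id0 := PySem.List.pyGetD (PySem.List.pyGetD logs 0 []) 0 0
  let e0 := PySem.List.pyGetD (PySem.List.pyGetD logs 0 []) 1 0
  let st := (PySem.List.pyRange 1 (PySem.List.len logs) 1).foldl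
    (fun st i => stepA st (PySem.List.pyGetD logs i [])) (id0, e0, e0)
  st.1

-- ===== PORT B =====
def hardestWorker3_alt (n : Int) (logs : List (List Int)) : Int :=
  let st := logs.foldl
    (fun (st : List (Int × Int) × Int) log =>
      (st.1 ++ [(st.2 - PySem.List.pyGetD log 1 0, PySem.List.pyGetD log 0 0)],
       PySem.List.pyGetD log 1 0))
    ([], 0)
  let sortedPairs := PySem.List.sorted2 st.1 (fun p => p.1) (fun p => p.2)
  (PySem.List.pyGetD sortedPairs 0 (0, 0)).2

-- ===== PRECONDITION & SPEC =====
-- Pre_ excludes exactly the inputs where Python A raises IndexError: empty logs, or a row shorter than 2.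
def Pre_hardestWorker3 (n : Int) (logs : List (List Int)) : Prop :=
  logs ≠ [] ∧ ∀ r ∈ logs, 2 ≤ r.length
instance (n : Int) (logs : List (List Int)) : Decidable (Pre_hardestWorker3 n logs) := by
  unfold Pre_hardestWorker3; infer_instance
def pvWitness_hardestWorker3 : Int × List (List Int) := (10, [[1, 3], [2, 5], [0, 9]])

def Spec_hardestWorker3 (n : Int) (logs : List (List Int)) (out : Int) : Prop := out = hardestWorker3_alt n logs
instance (n : Int) (logs : List (List Int)) (out : Int) : Decidable (Spec_hardestWorker3 n logs out) := by unfold Spec_hardestWorker3; infer_instance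

-- ===== CLAIM (what is proved, stated in full; the proofs are below) =====
def Claim_equal_hardestWorker3 : Prop := ∀ (n : Int) (logs : List (List Int)), Dom_hardestWorker3 n logs → Pre_hardestWorker3 n logs → Spec_hardestWorker3 n logs (hardestWorker3 n logs)

-- ===== LEMMAS AND PROOFS =====

-- the (prev_end - leave_time, id) pairs B builds, threaded by the previous end time
def negPairs (last : Int) (rows : List (List Int)) : List (Int × Int) :=
  match rows with
  | [] => []
  | r :: rs => (last - r.getD 1 0, r.getD 0 0) :: negPairs (r.getD 1 0) rs

-- B's build loop produces exactly negPairs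
theorem build_eq_negPairs (rows : List (List Int)) (acc : List (Int × Int)) (last : Int) :
    rows.foldl
      (fun (st : List (Int × Int) × Int) log =>
        (st.1 ++ [(st.2 - PySem.List.pyGetD log 1 0, PySem.List.pyGetD log 0 0)],
         PySem.List.pyGetD log 1 0)) (acc, last)
      = (acc ++ negPairs last rows,
         (rows.foldl (fun (st : List (Int × Int) × Int) log =>
            (st.1 ++ [(st.2 - PySem.List.pyGetD log 1 0, PySem.List.pyGetD log 0 0)],
             PySem.List.pyGetD log 1 0)) (acc, last)).2) := by
  induction rows generalizing acc last with
  | nil => simp [negPairs]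
  | cons r rs ih =>
      rw [List.foldl_cons, ih]
      simp [negPairs, PySem.List.pyGetD_ofNat']

-- the comparison sorted2 (no reverse) inserts with, and the "keep the better" step it induces on heads
def lexLt (a b : Int × Int) : Bool :=
  decide (a.1 < b.1) || (!decide (b.1 < a.1) && decide (a.2 < b.2))

def better (m x : Int × Int) : Int × Int := if lexLt x m then x else m

-- head of an insertion step
theorem head?_insertBy (x : Int × Int) (acc : List (Int × Int)) :
    (PySem.List.insertBy lexLt x acc).head? =
      some (match acc.head? with | none => x | some m => better m x) := by
  cases acc with
  | nil => rfl
  | cons y ys =>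
      simp only [PySem.List.insertBy, better, List.head?_cons]
      by_cases h : lexLt x y = true <;> simp [h]

-- head of the whole insertion-sort fold
theorem head?_sort_fold (xs : List (Int × Int)) (acc : List (Int × Int)) :
    ((xs.foldl (fun a x => PySem.List.insertBy lexLt x a) acc)).head? =
      xs.foldl (fun m? x => some (match m? with | none => x | some m => better m x)) acc.head? := by
  induction xs generalizing acc with
  | nil => rfl
  | cons x xs ih =>
      simp only [List.foldl_cons]
      rw [ih, head?_insertBy]

-- the option fold over a some-start is the plain better fold
theorem option_fold_eq (xs : List (Int × Int)) (m : Int × Int) :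
    xs.foldl (fun m? x => some (match m? with | none => x | some m => better m x)) (some m)
      = some (xs.foldl better m) := by
  induction xs generalizing m with
  | nil => rfl
  | cons x xs ih => simp only [List.foldl_cons]; exact ih (better m x)

-- A's loop body, rewritten as a single pick condition
theorem step_eq (id last mx : Int) (r : List Int) :
    stepA (id, last, mx) r =
      (if mx < r.getD 1 0 - last ∨ (¬ r.getD 1 0 - last < mx ∧ r.getD 0 0 < id)
        then (r.getD 0 0, r.getD 1 0, r.getD 1 0 - last)
        else (id, r.getD 1 0, mx)) := by
  simp only [stepA, PySem.List.pyGetD_ofNat', min_def]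
  split_ifs <;> simp_all [Prod.mk.injEq] <;> try omega

-- the "better" step on (-duration, id) pairs is exactly A's pick condition
theorem better_eq (id last mx : Int) (r : List Int) :
    better (-mx, id) (last - r.getD 1 0, r.getD 0 0) =
      (if mx < r.getD 1 0 - last ∨ (¬ r.getD 1 0 - last < mx ∧ r.getD 0 0 < id)
        then (last - r.getD 1 0, r.getD 0 0) else (-mx, id)) := by
  have hiff : (lexLt (last - r.getD 1 0, r.getD 0 0) (-mx, id) = true) ↔
      (mx < r.getD 1 0 - last ∨ (¬ r.getD 1 0 - last < mx ∧ r.getD 0 0 < id)) := by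
    simp only [lexLt, Bool.or_eq_true, Bool.and_eq_true, Bool.not_eq_true',
      decide_eq_true_eq, decide_eq_false_iff_not]
    omega
  unfold better
  by_cases hC : mx < r.getD 1 0 - last ∨ (¬ r.getD 1 0 - last < mx ∧ r.getD 0 0 < id)
  · rw [if_pos (hiff.mpr hC), if_pos hC]
  · rw [if_neg (fun hb => hC (hiff.mp hb)), if_neg hC]

-- main invariant: the better-fold over B's pairs tracks A's scan state
theorem mainInv (rows : List (List Int)) (id last mx : Int) :
    (negPairs last rows).foldl better (-mx, id)
      = (-((rows.foldl stepA (id, last, mx)).2.2), (rows.foldl stepA (id, last, mx)).1) := by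
  induction rows generalizing id last mx with
  | nil => rfl
  | cons r rs ih =>
      rw [negPairs, List.foldl_cons, List.foldl_cons, better_eq, step_eq]
      by_cases hC : mx < r.getD 1 0 - last ∨ (¬ r.getD 1 0 - last < mx ∧ r.getD 0 0 < id)
      · rw [if_pos hC, if_pos hC,
          show last - r.getD 1 0 = -(r.getD 1 0 - last) from by ring]
        exact ih (r.getD 0 0) (r.getD 1 0) (r.getD 1 0 - last)
      · rw [if_neg hC, if_neg hC]
        exact ih id (r.getD 1 0) mx

theorem ports_agree (n : Int) (logs : List (List Int)) (h : logs ≠ []) :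
    hardestWorker3 n logs = hardestWorker3_alt n logs := by
  cases logs with
  | nil => exact absurd rfl h
  | cons r0 rest =>
      show ((PySem.List.pyRange 1 (PySem.List.len (r0 :: rest)) 1).foldl
          (fun st i => stepA st (PySem.List.pyGetD (r0 :: rest) i [])) _).1 = _
      rw [show (PySem.List.pyRange 1 (PySem.List.len (r0 :: rest)) 1) =
            PySem.List.pyRange 1 (PySem.List.len (r0 :: rest)) from rfl,
          PySem.List.foldl_pyRange_pyGetD (r0 :: rest) [] stepA _ (by norm_num)]
      unfold hardestWorker3_alt
      rw [build_eq_negPairs]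
      simp only [PySem.List.pyGetD_ofNat', List.getD_cons_zero, Int.toNat_one,
        List.drop_succ_cons, List.drop_zero, List.nil_append]
      rw [show PySem.List.sorted2 (negPairs 0 (r0 :: rest)) (fun p => (p.1 : Int)) (fun p => (p.2 : Int)) =
            (negPairs 0 (r0 :: rest)).foldl (fun a x => PySem.List.insertBy lexLt x a) [] from rfl]
      have hhd : ((negPairs 0 (r0 :: rest)).foldl (fun a x => PySem.List.insertBy lexLt x a) []).head?
          = some (-((rest.foldl stepA (r0.getD 0 0, r0.getD 1 0, r0.getD 1 0)).2.2),
                  (rest.foldl stepA (r0.getD 0 0, r0.getD 1 0, r0.getD 1 0)).1) := by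
        rw [head?_sort_fold]
        show (negPairs (r0.getD 1 0) rest).foldl
            (fun m? x => some (match m? with | none => x | some m => better m x))
            (some (0 - r0.getD 1 0, r0.getD 0 0)) = _
        rw [option_fold_eq]
        rw [show (0 - r0.getD 1 0, r0.getD 0 0) = (-(r0.getD 1 0), r0.getD 0 0) from by rw [zero_sub]]
        rw [mainInv rest (r0.getD 0 0) (r0.getD 1 0) (r0.getD 1 0)]
      obtain ⟨m, t, hs⟩ : ∃ m t, ((negPairs 0 (r0 :: rest)).foldl
          (fun a x => PySem.List.insertBy lexLt x a) []) = m :: t := by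
        cases hsE : ((negPairs 0 (r0 :: rest)).foldl
            (fun a x => PySem.List.insertBy lexLt x a) []) with
        | nil => rw [hsE] at hhd; simp at hhd
        | cons m t => exact ⟨m, t, rfl⟩
      rw [hs] at hhd ⊢
      simp only [List.head?_cons, Option.some.injEq] at hhd
      simp only [List.getD_cons_zero]
      rw [hhd]

-- ===== VERDICT (by name: the statement is the Claim_ definition above) =====
theorem hardestWorker3_spec : Claim_equal_hardestWorker3 := by
  intro n logs _ hpre
  unfold Spec_hardestWorker3
  exact ports_agree n logs hpre.1
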